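-- pv_equiv track=rewrite | github.com/andresdh/CodeFights | Core/04_Loop Tunnel/32_rounders.py | rounders
-- ===== SOURCE A (Python) =====
-- def rounders(n):
--     number = str(n)[::-1]
--     no_ceros = len(number)-number.count("0",0,len(number))
--     res = ""
--     resto = 0
--
--     for x in number:
--         if x == "0":
--             res += "0"
--         elif no_ceros == 1:
--             res += str(resto+int(x))[::-1]
--         elif (int(x)+resto) >= 5:
--             res += "0"
--             resto = 1
--             no_ceros -= 1
--         else:
--             res += "0"
--             no_ceros -= 1
--             resto = 0
--     return int(res[::-1])
-- ===== SOURCE B (Python) =====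
-- def rounders(n):
--     s = str(n)
--     carry = 0
--     for ch in reversed(s[1:]):
--         d = int(ch)
--         if d != 0:
--             carry = 1 if d + carry >= 5 else 0
--     return (int(s[0]) + carry) * 10 ** (len(s) - 1)
-- ===== Notes on version B (the rewrite author's own statement) =====
-- stated objective: simpler
-- what changed: A builds a reversed result string digit by digit while counting remaining nonzero digits and re-parses it with int(); B runs one carry fold over the digits after the leading one and returns (leading digit + carry) * 10**(len-1) by pure integer arithmetic.
import Mathlib
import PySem

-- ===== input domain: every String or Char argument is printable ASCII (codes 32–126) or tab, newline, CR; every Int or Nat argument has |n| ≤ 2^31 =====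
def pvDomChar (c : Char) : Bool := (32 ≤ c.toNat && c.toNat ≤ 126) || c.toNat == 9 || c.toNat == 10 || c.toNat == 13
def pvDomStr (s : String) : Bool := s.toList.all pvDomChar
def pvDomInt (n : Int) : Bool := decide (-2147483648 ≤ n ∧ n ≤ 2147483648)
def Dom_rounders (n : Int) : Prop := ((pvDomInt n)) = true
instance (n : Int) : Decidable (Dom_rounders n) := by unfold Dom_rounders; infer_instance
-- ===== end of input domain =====

-- B replaces A's reversed-string building, zero-counting and string re-parsing by one
-- least-significant-first carry fold over the digits after the leading one plus integer
-- arithmetic (objective: simpler).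

-- ===== PORT A =====
-- int(x) for a one-character string x; exact where Python returns (digit chars — on a
-- non-digit char Python raises ValueError, which only happens for n outside Pre_).
def pyIntChar (c : Char) : Int := (PySem.Int.ofChars? [c]).getD 0

-- one iteration of A's 'for x in number' loop; state = (res, resto, no_ceros)
def roundersStep (st : List Char × Int × Int) (x : Char) : List Char × Int × Int :=
  if x = '0' then (st.1 ++ ['0'], st.2.1, st.2.2)
  else if st.2.2 = 1 then
    (st.1 ++ (PySem.Int.toChars (st.2.1 + pyIntChar x)).reverse, st.2.1, st.2.2)
  else if pyIntChar x + st.2.1 ≥ 5 then (st.1 ++ ['0'], 1, st.2.2 - 1)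
  else (st.1 ++ ['0'], 0, st.2.2 - 1)

def rounders (n : Int) : Int :=
  let number := (PySem.Int.toChars n).reverse                    -- str(n)[::-1]
  -- number.count("0", 0, len(number)) = count of "0" in number[0:len(number)]
  let noCeros : Int := PySem.List.len number -
    (PySem.Chars.count (PySem.List.slice number (some 0) (some (PySem.List.len number))) ['0'] : Int)
  let st := number.foldl roundersStep ([], 0, noCeros)
  -- int(res[::-1]); exact: whenever Python returns, res is a nonempty digit string
  (PySem.Int.ofChars? st.1.reverse).getD 0

-- ===== PORT B =====
-- one iteration of B's carry loop over the digits after the leading one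
def altCarryStep (carry : Int) (ch : Char) : Int :=
  let d := pyIntChar ch
  if d ≠ 0 then (if d + carry ≥ 5 then 1 else 0) else carry

def rounders_alt (n : Int) : Int :=
  let s := PySem.Int.toChars n                                   -- str(n)
  let carry := ((PySem.List.slice s (some 1) none).reverse).foldl altCarryStep 0  -- reversed(s[1:])
  -- int(s[0]); s is nonempty, and len(s)-1 ≥ 0 so 10 ** (len(s)-1) is the Nat power
  (pyIntChar ((PySem.List.pyGet? s 0).getD '0') + carry) * 10 ^ (s.length - 1)

-- ===== PRECONDITION & SPEC =====
-- A raises ValueError on every negative n (int('-')); Pre_ admits exactly the inputs A returns on.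
def Pre_rounders (n : Int) : Prop := 0 ≤ n
instance (n : Int) : Decidable (Pre_rounders n) := by unfold Pre_rounders; infer_instance
def pvWitness_rounders : Int := (15)

def Spec_rounders (n : Int) (out : Int) : Prop := out = rounders_alt n
instance (n : Int) (out : Int) : Decidable (Spec_rounders n out) := by unfold Spec_rounders; infer_instance

-- ===== CLAIM (what is proved, stated in full; the proofs are below) =====
def Claim_equal_rounders : Prop := ∀ (n : Int), Dom_rounders n → Pre_rounders n → Spec_rounders n (rounders n)

-- ===== LEMMAS AND PROOFS =====

-- the ten decimal digit characters
def pvDigits : List Char := ['0','1','2','3','4','5','6','7','8','9']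

theorem mem_pvDigits_toDigits (m : Nat) : ∀ c ∈ Nat.toDigits 10 m, c ∈ pvDigits := by
  induction m using Nat.strong_induction_on with
  | _ m ih =>
    intro c hc
    by_cases h : m < 10
    · rw [Nat.toDigits_of_lt_base h] at hc
      simp at hc; subst hc
      interval_cases m <;> decide
    · rw [Nat.toDigits_of_base_le (by norm_num) (by omega)] at hc
      rcases List.mem_append.mp hc with h1 | h1
      · exact ih (m / 10) (Nat.div_lt_self (by omega) (by norm_num)) c h1
      · simp at h1; subst h1
        have h2 : m % 10 < 10 := Nat.mod_lt _ (by norm_num)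
        interval_cases h3 : (m % 10) <;> decide

theorem head?_toDigits_ne_zero (m : Nat) (hm : 0 < m) :
    (Nat.toDigits 10 m).head? ≠ some '0' := by
  induction m using Nat.strong_induction_on with
  | _ m ih =>
    by_cases h : m < 10
    · rw [Nat.toDigits_of_lt_base h]
      interval_cases m <;> decide
    · rw [Nat.toDigits_of_base_le (by norm_num) (by omega)]
      have hpos : 0 < (Nat.toDigits 10 (m / 10)).length := Nat.length_toDigits_pos
      have hne : Nat.toDigits 10 (m / 10) ≠ [] := by
        intro hnil; rw [hnil] at hpos; simp at hpos
      rw [List.head?_append_of_ne_nil _ hne]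
      exact ih (m / 10) (Nat.div_lt_self (by omega) (by norm_num))
        (Nat.div_pos (by omega) (by norm_num))

theorem pyIntChar_ne_zero {c : Char} (hc : c ∈ pvDigits) (h0 : c ≠ '0') :
    1 ≤ pyIntChar c ∧ pyIntChar c ≤ 9 := by
  fin_cases hc <;> simp_all <;> decide

theorem pyIntChar_zero : pyIntChar '0' = 0 := by decide

theorem count_go_single (l : List Char) : ∀ (fuel acc : Nat), l.length ≤ fuel →
    PySem.Chars.count.go ['0'] fuel l acc = acc + l.count '0' := by
  induction l with
  | nil => intro fuel acc _; cases fuel <;> simp [PySem.Chars.count.go]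
  | cons x t ih =>
    intro fuel acc hf
    cases fuel with
    | zero => simp at hf
    | succ f =>
      have hft : t.length ≤ f := by simpa using hf
      rw [PySem.Chars.count.go]
      by_cases hx : x = '0'
      · subst hx
        have hpre : (['0'].isPrefixOf ('0' :: t)) = true := by simp [List.isPrefixOf]
        rw [if_pos hpre]
        have hdrop : List.drop (['0'] : List Char).length ('0' :: t) = t := by simp
        rw [hdrop, ih f (acc + 1) hft]
        simp [List.count_cons]
        omega
      · have hpre : (['0'].isPrefixOf (x :: t)) = false := by
          simp [List.isPrefixOf]
          intro h; exact hx h.symm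
        rw [hpre]
        simp only [Bool.false_eq_true, if_false]
        rw [ih f acc hft]
        simp [List.count_cons, hx]

theorem chars_count_zero (s : List Char) : PySem.Chars.count s ['0'] = s.count '0' := by
  rw [PySem.Chars.count, if_neg (by simp)]
  simpa using count_go_single s s.length 0 le_rfl

theorem carry_mem (ds : List Char) : ∀ carry : Int, carry = 0 ∨ carry = 1 →
    ds.foldl altCarryStep carry = 0 ∨ ds.foldl altCarryStep carry = 1 := by
  induction ds with
  | nil => intro c h; simpa using h
  | cons x t ih =>
    intro c h
    simp only [List.foldl_cons]
    apply ih
    simp only [altCarryStep]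
    split_ifs <;> simp [h]

-- A's loop over the digits strictly below the leading one: res collects zeros,
-- no_ceros counts down to 1, resto follows exactly B's carry fold.
theorem fold_inv (ds : List Char) (hd : ∀ c ∈ ds, c ∈ pvDigits) :
    ∀ (res : List Char) (resto : Int),
    ds.foldl roundersStep (res, resto, (ds.countP (fun c => !(c == '0')) : Int) + 1)
      = (res ++ List.replicate ds.length '0', ds.foldl altCarryStep resto, 1) := by
  induction ds with
  | nil => intro res resto; simp
  | cons x t ih =>
    intro res resto
    have hx := hd x (by simp)
    have ht : ∀ c ∈ t, c ∈ pvDigits := fun c hc => hd c (by simp [hc])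
    by_cases h0 : x = '0'
    · subst h0
      have hcount : (List.countP (fun c => !(c == '0')) ('0' :: t) : Int)
          = (List.countP (fun c => !(c == '0')) t : Int) := by
        simp [List.countP_cons]
      simp only [List.foldl_cons, hcount]
      rw [show roundersStep (res, resto, (List.countP (fun c => !(c == '0')) t : Int) + 1) '0'
            = (res ++ ['0'], resto, (List.countP (fun c => !(c == '0')) t : Int) + 1) by
        simp [roundersStep]]
      rw [ih ht (res ++ ['0']) resto]
      have hc : altCarryStep resto '0' = resto := by simp [altCarryStep, pyIntChar_zero]
      simp [hc, List.replicate_succ]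
    · obtain ⟨h1, h9⟩ := pyIntChar_ne_zero hx h0
      have hdne : pyIntChar x ≠ 0 := by omega
      set k : Int := (List.countP (fun c => !(c == '0')) t : Int) with hk
      have hk0 : 0 ≤ k := by simp [hk]
      have hcount : (List.countP (fun c => !(c == '0')) (x :: t) : Int) + 1 = k + 2 := by
        simp [List.countP_cons, h0, hk]
        omega
      simp only [List.foldl_cons, hcount]
      have hstep : roundersStep (res, resto, k + 2) x
          = (res ++ ['0'], if pyIntChar x + resto ≥ 5 then (1:Int) else 0, k + 1) := by
        simp only [roundersStep]
        rw [if_neg h0, if_neg (show ¬((res, resto, k + 2) : List Char × Int × Int).2.2 = 1 by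
          simp; omega)]
        split_ifs with h5 <;> simp <;> omega
      rw [hstep]
      have hcarry : altCarryStep resto x = if pyIntChar x + resto ≥ 5 then (1:Int) else 0 := by
        simp only [altCarryStep]
        rw [if_pos hdne]
      split_ifs with h5
      · rw [show (k:Int) + 1 = (List.countP (fun c => !(c == '0')) t : Int) + 1 from rfl]
        rw [ih ht (res ++ ['0']) 1]
        simp [List.foldl_cons, hcarry, h5, List.replicate_succ]
      · rw [show (k:Int) + 1 = (List.countP (fun c => !(c == '0')) t : Int) + 1 from rfl]
        rw [ih ht (res ++ ['0']) 0]
        simp [List.foldl_cons, hcarry, h5, List.replicate_succ]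

theorem count_zero_split (l : List Char) :
    l.count '0' + l.countP (fun d => !(d == '0')) = l.length := by
  induction l with
  | nil => simp
  | cons a t iht =>
    by_cases ha : a = '0' <;>
      simp [List.count_cons, List.countP_cons, ha] <;> omega

theorem toChars_lt10 (n : Int) (h0 : 0 ≤ n) (h10 : n < 10) :
    PySem.Int.toChars n = [Nat.digitChar n.toNat] := by
  simp only [PySem.Int.toChars]
  rw [if_neg (by omega)]
  exact Nat.toDigits_of_lt_base (by omega)

theorem toChars_ten : PySem.Int.toChars 10 = ['1', '0'] := by
  simp only [PySem.Int.toChars]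
  rw [if_neg (by norm_num)]
  have h : (10:Int).toNat = 10 := rfl
  rw [h, Nat.toDigits_of_base_le (by norm_num) le_rfl]
  norm_num
  rw [Nat.toDigits_of_lt_base (by norm_num)]
  decide

-- parsing the leading part back with trailing zeros appended = multiply by 10^L
theorem parse_append_zeros (m : Int) (L : Nat) (h1 : 1 ≤ m) (h10 : m ≤ 10) (hL : L ≤ 9) :
    (PySem.Int.ofChars? (PySem.Int.toChars m ++ List.replicate L '0')).getD 0 = m * 10 ^ L := by
  interval_cases m <;>
    first
      | (rw [toChars_lt10 _ (by norm_num) (by norm_num)]; interval_cases L <;> decide)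
      | (rw [toChars_ten]; interval_cases L <;> decide)

theorem zero_case : rounders 0 = rounders_alt 0 := by
  have hz : PySem.Int.toChars 0 = ['0'] := by
    simp only [PySem.Int.toChars]
    rw [if_neg (by norm_num)]
    exact Nat.toDigits_zero 10
  simp only [rounders, rounders_alt, hz]
  decide

theorem main_case (n : Int) (h1 : (1:Int) ≤ n) (hub : n ≤ 2147483648) :
    rounders n = rounders_alt n := by
  obtain ⟨c, rest, hlist⟩ : ∃ c rest, Nat.toDigits 10 n.toNat = c :: rest := by
    cases h : Nat.toDigits 10 n.toNat with
    | nil =>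
      have hp : 0 < (Nat.toDigits 10 n.toNat).length := Nat.length_toDigits_pos
      rw [h] at hp; simp at hp
    | cons c rest => exact ⟨c, rest, rfl⟩
  have hcs : PySem.Int.toChars n = c :: rest := by
    simp only [PySem.Int.toChars]
    rw [if_neg (by omega)]
    exact hlist
  have hmem : ∀ d ∈ c :: rest, d ∈ pvDigits := fun d hd =>
    mem_pvDigits_toDigits n.toNat d (hlist ▸ hd)
  have hc : c ≠ '0' := by
    have h := head?_toDigits_ne_zero n.toNat (by omega)
    rw [hlist] at h
    simpa using h
  obtain ⟨hcv1, hcv9⟩ := pyIntChar_ne_zero (hmem c (by simp)) hc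
  have hrevmem : ∀ d ∈ rest.reverse, d ∈ pvDigits := fun d hd =>
    hmem d (by simp at hd; simp [hd])
  have hcb := carry_mem rest.reverse 0 (Or.inl rfl)
  have hL : rest.length ≤ 9 := by
    have hlen : (Nat.toDigits 10 n.toNat).length ≤ 10 :=
      (Nat.length_toDigits_le_iff (by norm_num) (by norm_num)).mpr (by omega)
    rw [hlist] at hlen
    simp at hlen
    omega
  have hA : rounders n
      = (rest.reverse.foldl altCarryStep 0 + pyIntChar c) * 10 ^ rest.length := by
    simp only [rounders, hcs]
    have hslice : PySem.List.slice ((c :: rest).reverse) (some 0)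
        (some (PySem.List.len ((c :: rest).reverse))) = (c :: rest).reverse := by
      have hb : (0:Int) ≤ PySem.List.len ((c :: rest).reverse) := by
        simp only [PySem.List.len_eq]
        omega
      rw [PySem.List.slice_zero_start, PySem.List.slice_to _ hb]
      simp [PySem.List.len_eq]
    rw [hslice, chars_count_zero]
    have hnoc : PySem.List.len ((c :: rest).reverse) - (((c :: rest).reverse).count '0' : Int)
        = (List.countP (fun d => !(d == '0')) rest.reverse : Int) + 1 := by
      have e1 := count_zero_split rest
      have e3 : ((c :: rest).reverse).count '0' = rest.count '0' := by
        simp [List.count_cons, hc]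
      have e4 : List.countP (fun d => !(d == '0')) rest.reverse
          = List.countP (fun d => !(d == '0')) rest := by
        simp
      rw [e3, e4]
      simp only [PySem.List.len_eq, List.length_reverse, List.length_cons]
      omega
    rw [hnoc]
    have hsplit : (c :: rest).reverse = rest.reverse ++ [c] := by simp
    rw [hsplit, List.foldl_append, fold_inv rest.reverse hrevmem [] 0]
    simp only [List.foldl_cons, List.foldl_nil]
    have hstep : roundersStep (([] : List Char) ++ List.replicate rest.reverse.length '0',
        rest.reverse.foldl altCarryStep 0, 1) c
        = (([] : List Char) ++ List.replicate rest.reverse.length '0'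
            ++ (PySem.Int.toChars (rest.reverse.foldl altCarryStep 0 + pyIntChar c)).reverse,
           rest.reverse.foldl altCarryStep 0, 1) := by
      simp only [roundersStep]
      rw [if_neg hc]
      simp
    rw [hstep]
    have hrev : (([] : List Char) ++ List.replicate rest.reverse.length '0'
        ++ (PySem.Int.toChars (rest.reverse.foldl altCarryStep 0 + pyIntChar c)).reverse).reverse
        = PySem.Int.toChars (rest.reverse.foldl altCarryStep 0 + pyIntChar c)
            ++ List.replicate rest.length '0' := by
      simp
    rw [hrev]
    exact parse_append_zeros _ rest.length (by omega) (by omega) hL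
  have hB : rounders_alt n
      = (pyIntChar c + rest.reverse.foldl altCarryStep 0) * 10 ^ rest.length := by
    simp only [rounders_alt, hcs]
    rw [PySem.List.slice_from_one]
    simp only [List.tail_cons, PySem.List.pyGet?_zero_cons, Option.getD_some,
      List.length_cons, Nat.add_sub_cancel]
  rw [hA, hB, Int.add_comm]

-- ===== VERDICT (by name: the statement is the Claim_ definition above) =====
theorem rounders_spec : Claim_equal_rounders := by
  intro n hdom hpre
  unfold Spec_rounders
  by_cases h : n = 0
  · subst h; exact zero_case
  · have hub : n ≤ 2147483648 := by
      unfold Dom_rounders pvDomInt at hdom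
      simpa using (of_decide_eq_true hdom).2
    have h1 : (1:Int) ≤ n := by
      unfold Pre_rounders at hpre; omega
    exact main_case n h1 hub
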